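-- pv_equiv track=rewrite | github.com/kaushalaneesha/Coding-Practice | PythonPractice/src/interview_questions/google/brick_connection.py | get_non_connected_bricks
-- ===== SOURCE A (Python) =====
-- from typing import List
--
-- def get_non_connected_bricks(arr: List[List[int]], row: int, col: int) -> \
--         List[tuple]:
--     res = []
--     for i in range(col):
--         if arr[row - 1][i] == 1:
--             arr[row - 1][i] = 2
--             mark_connected(arr, row - 2, i, row, col)
--     for i in range(row):
--         for j in range(col):
--             if arr[i][j] == 1:
--                 res.append((i, j))
--     return res
--
-- def mark_connected(arr: List[List[int]], row, col, total_row,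
--                    total_col) -> None:
--     if 0 <= row < total_row and 0 <= col < total_col:
--         if arr[row][col] == 2 or arr[row][col] == 0:
--             return None
--         else:
--             arr[row][col] = 2
--             mark_connected(arr, row - 1, col, total_row, total_col)
--             mark_connected(arr, row + 1, col, total_row, total_col)
--             mark_connected(arr, row, col - 1, total_row, total_col)
--             mark_connected(arr, row, col + 1, total_row, total_col)
-- ===== SOURCE B (Python) =====
-- from typing import List
--
-- def get_non_connected_bricks(arr: List[List[int]], row: int, col: int) -> \
--         List[tuple]:
--     # Non-mutating: track connected cells in a visited set and flood
--     # iteratively with an explicit stack (A mutates arr in place; B does not).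
--     marked = set()
--
--     def val(r, c):
--         return 2 if (r, c) in marked else arr[r][c]
--
--     for i in range(col):
--         if val(row - 1, i) == 1:
--             marked.add((row - 1, i))
--             stack = [(row - 2, i)]
--             while stack:
--                 r, c = stack.pop()
--                 if 0 <= r < row and 0 <= c < col and val(r, c) not in (0, 2):
--                     marked.add((r, c))
--                     stack += [(r, c + 1), (r, c - 1), (r + 1, c), (r - 1, c)]
--     return [(i, j) for i in range(row) for j in range(col)
--             if arr[i][j] == 1 and (i, j) not in marked]
-- ===== Notes on version B (the rewrite author's own statement) =====
-- stated objective: alternative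
-- what changed: A's recursive flood fill that mutates the grid in place (writing 2s) is replaced by an iterative stack-driven fill over a separate visited set `marked`, leaving the input grid untouched; the result is collected by filtering the original grid against the set instead of rescanning the mutated grid.
-- outside the precondition, e.g. on get_non_connected_bricks([[1], [0]], -1, 1): A returns [], B returns []
import Mathlib
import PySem

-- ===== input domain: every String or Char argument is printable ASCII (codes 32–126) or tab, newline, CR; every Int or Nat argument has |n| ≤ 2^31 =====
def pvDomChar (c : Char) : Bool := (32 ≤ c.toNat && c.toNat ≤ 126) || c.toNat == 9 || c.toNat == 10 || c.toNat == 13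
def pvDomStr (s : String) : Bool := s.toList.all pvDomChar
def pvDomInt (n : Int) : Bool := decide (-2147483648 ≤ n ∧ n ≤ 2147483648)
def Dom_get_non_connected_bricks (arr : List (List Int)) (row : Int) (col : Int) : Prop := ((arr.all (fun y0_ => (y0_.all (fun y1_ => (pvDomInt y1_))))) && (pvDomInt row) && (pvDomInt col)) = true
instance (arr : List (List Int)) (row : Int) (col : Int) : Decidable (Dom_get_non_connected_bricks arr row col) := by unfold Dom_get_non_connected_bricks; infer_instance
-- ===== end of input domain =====

-- B replaces A's recursive, grid-mutating flood fill by an iterative one over a `marked`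
-- visited set with an explicit stack; A mutates `arr` in place, B does not mutate at all —
-- the equivalence proved here is about the RETURN value.

-- ===== PORT A =====
-- arr[r][c] as a total function (both Pythons only read inside the guarded bounds,
-- which Pre_ makes actual bounds; pyGet? keeps Python's negative-index rule for reads)
def pvGet (g : List (List Int)) (r c : Int) : Int :=
  ((PySem.List.pyGet? g r).bind (fun rw => PySem.List.pyGet? rw c)).getD 0

-- arr[r][c] = v (assignments in A happen only at guarded nonnegative in-range
-- indices; List.set is a no-op out of range, never reached under Pre_)
def pvSet (g : List (List Int)) (r c : Int) (v : Int) : List (List Int) :=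
  if 0 ≤ r ∧ 0 ≤ c then g.set r.toNat ((g.getD r.toNat []).set c.toNat v) else g

-- fuel bound for the recursion of mark_connected: nesting depth ≤ number of cells + 1
def pvFuelA (arr : List (List Int)) : Nat := (arr.map List.length).sum + 1

-- literal port of mark_connected (fuel only makes the recursion structural; it is never
-- exhausted under Pre_, see pvMark_fuel)
def pvMark : Nat → List (List Int) → Int → Int → Int → Int → List (List Int)
  | 0, g, _, _, _, _ => g
  | f + 1, g, r, c, tr, tc =>
    if 0 ≤ r ∧ r < tr ∧ 0 ≤ c ∧ c < tc then
      if pvGet g r c = 2 ∨ pvGet g r c = 0 then g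
      else
        pvMark f (pvMark f (pvMark f (pvMark f (pvSet g r c 2) (r - 1) c tr tc)
          (r + 1) c tr tc) r (c - 1) tr tc) r (c + 1) tr tc
    else g

def get_non_connected_bricks (arr : List (List Int)) (row : Int) (col : Int) : List (Int × Int) :=
  let g := (PySem.List.pyRange 0 col 1).foldl (fun g i =>
    if pvGet g (row - 1) i = 1 then
      pvMark (pvFuelA arr) (pvSet g (row - 1) i 2) (row - 2) i row col
    else g) arr
  (PySem.List.pyRange 0 row 1).foldl (fun res i =>
    (PySem.List.pyRange 0 col 1).foldl (fun res j =>
      if pvGet g i j = 1 then res ++ [(i, j)] else res) res) []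

-- ===== PORT B =====
-- B's helper val(r, c): 2 if the cell was marked connected, else the (unmutated) grid value
def pvVal (arr : List (List Int)) (M : PySem.Set (Int × Int)) (r c : Int) : Int :=
  if (r, c) ∈ M then 2 else pvGet arr r c

-- fuel bound for the while loop: pops ≤ pushes ≤ 1 + 4·cells (never exhausted under Pre_)
def pvFuelB (arr : List (List Int)) : Nat := 5 * (arr.map List.length).sum + 5

-- the while loop: drain the stack, growing the visited set (head of the list = top of the
-- Python stack, so pops come in the order (r-1,c),(r+1,c),(r,c-1),(r,c+1))
def pvBfs : Nat → List (List Int) → PySem.Set (Int × Int) → List (Int × Int) → Int → Int → PySem.Set (Int × Int)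
  | _, _, M, [], _, _ => M
  | 0, _, M, _ :: _, _, _ => M
  | f + 1, arr, M, (r, c) :: st, tr, tc =>
    if 0 ≤ r ∧ r < tr ∧ 0 ≤ c ∧ c < tc ∧ pvVal arr M r c ≠ 0 ∧ pvVal arr M r c ≠ 2 then
      pvBfs f arr (PySem.Set.add M (r, c)) ((r - 1, c) :: (r + 1, c) :: (r, c - 1) :: (r, c + 1) :: st) tr tc
    else pvBfs f arr M st tr tc

def get_non_connected_bricks_alt (arr : List (List Int)) (row : Int) (col : Int) : List (Int × Int) :=
  let M := (PySem.List.pyRange 0 col 1).foldl (fun M i =>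
    if pvVal arr M (row - 1) i = 1 then
      pvBfs (pvFuelB arr) arr (PySem.Set.add M (row - 1, i)) [(row - 2, i)] row col
    else M) (PySem.Set.empty)
  (PySem.List.pyRange 0 row 1).flatMap (fun i =>
    ((PySem.List.pyRange 0 col 1).filter
      (fun j => pvGet arr i j == 1 && !(decide ((i, j) ∈ M)))).map (fun j => (i, j)))

-- ===== PRECONDITION & SPEC =====
-- Pre_ is the documented grid shape — arr has at least `row` rows (0 < row), each with at
-- least `col` entries (later rows are never touched) — plus the trivial col ≤ 0 case (both loops are empty, A returns []).
-- A also happens to return on some malformed shapes (negative `row` reaching the grid via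
-- Python's negative-index wraparound): those accidental shapes are excluded, see the cites.
def Pre_get_non_connected_bricks (arr : List (List Int)) (row : Int) (col : Int) : Prop :=
  col ≤ 0 ∨
    (0 < row ∧ 0 < col ∧ row ≤ (arr.length : Int) ∧
      ∀ rw ∈ arr.take row.toNat, col ≤ (rw.length : Int))
instance (arr : List (List Int)) (row : Int) (col : Int) : Decidable (Pre_get_non_connected_bricks arr row col) := by unfold Pre_get_non_connected_bricks; infer_instance

def pvWitness_get_non_connected_bricks : List (List Int) × Int × Int := ([[1, 0], [0, 1]], 2, 2)

def Spec_get_non_connected_bricks (arr : List (List Int)) (row : Int) (col : Int) (out : List (Int × Int)) : Prop := out = get_non_connected_bricks_alt arr row col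
instance (arr : List (List Int)) (row : Int) (col : Int) (out : List (Int × Int)) : Decidable (Spec_get_non_connected_bricks arr row col out) := by unfold Spec_get_non_connected_bricks; infer_instance

-- ===== CLAIM (what is proved, stated in full; the proofs are below) =====
def Claim_equal_get_non_connected_bricks : Prop := ∀ (arr : List (List Int)) (row : Int) (col : Int), Dom_get_non_connected_bricks arr row col → Pre_get_non_connected_bricks arr row col → Spec_get_non_connected_bricks arr row col (get_non_connected_bricks arr row col)

-- ===== LEMMAS AND PROOFS =====

-- the grid shape (row lengths); A only overwrites entries, so it is invariant
def pvShape (g : List (List Int)) : List Nat := g.map List.length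

-- number of entries ≠ 2 (the marking measure)
def pvUC (g : List (List Int)) : Nat :=
  (g.map (fun rw => rw.countP (fun x => decide (x ≠ 2)))).sum

-- bounds actually guaranteeing in-range access
def pvOK (g : List (List Int)) (tr tc : Int) : Prop :=
  tr ≤ (g.length : Int) ∧ ∀ rw ∈ g.take tr.toNat, tc ≤ (rw.length : Int)

-- PROOF-ONLY bridge: A's flood fill rewritten as a stack loop over the grid, the stepping
-- stone between pvMark (recursion on the mutated grid) and pvBfs (stack on the visited set)
def pvStack : Nat → List (List Int) → List (Int × Int) → Int → Int → List (List Int)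
  | _, g, [], _, _ => g
  | 0, g, _ :: _, _, _ => g
  | f + 1, g, (r, c) :: st, tr, tc =>
    if 0 ≤ r ∧ r < tr ∧ 0 ≤ c ∧ c < tc ∧ pvGet g r c ≠ 0 ∧ pvGet g r c ≠ 2 then
      pvStack f (pvSet g r c 2) ((r - 1, c) :: (r + 1, c) :: (r, c - 1) :: (r, c + 1) :: st) tr tc
    else pvStack f g st tr tc

theorem pvShape_set (g : List (List Int)) (r c v : Int) :
    pvShape (pvSet g r c v) = pvShape g := by
  unfold pvSet pvShape
  split
  · by_cases hi : r.toNat < g.length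
    · simp only [List.map_set, List.length_set, List.getD_eq_getElem _ _ hi]
      rw [show g[r.toNat].length = (List.map List.length g)[r.toNat]'(by simpa using hi) by simp]
      exact List.set_getElem_self ..
    · rw [List.set_eq_of_length_le (by omega)]
  · rfl

theorem pvUC_le (g : List (List Int)) : pvUC g ≤ (g.map List.length).sum := by
  unfold pvUC
  induction g with
  | nil => simp
  | cons rw t ih => simpa using Nat.add_le_add List.countP_le_length ih

theorem pvOK_of_shape {g g' : List (List Int)} {tr tc : Int}
    (h : pvShape g' = pvShape g) (hok : pvOK g tr tc) : pvOK g' tr tc := by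
  obtain ⟨h1, h2⟩ := hok
  constructor
  · have : g'.length = g.length := by
      have := congrArg List.length h
      simpa [pvShape] using this
    omega
  · intro rw hrw
    have hmem : (rw.length : Nat) ∈ (pvShape g).take tr.toNat := by
      rw [← h, pvShape, ← List.map_take]
      exact List.mem_map_of_mem hrw
    rw [pvShape, ← List.map_take] at hmem
    obtain ⟨rw2, hrw2, hlen⟩ := List.mem_map.mp hmem
    have := h2 rw2 hrw2
    omega

theorem pvSum_set (L : List Nat) (n : Nat) (a : Nat) (h : n < L.length) :
    (L.set n a).sum + L[n] = L.sum + a := by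
  have hd : L.drop n = L[n] :: L.drop (n + 1) := List.drop_eq_getElem_cons h
  have h1 : L.sum = (L.take n).sum + (L[n] + (L.drop (n + 1)).sum) := by
    conv_lhs => rw [← List.take_append_drop n L, hd]
    rw [List.sum_append, List.sum_cons]
  rw [List.sum_set, h1]
  simp [h]; omega

-- reading the actual cell under the bounds
theorem pvGet_eq {g : List (List Int)} {tr tc r c : Int} (hok : pvOK g tr tc)
    (hb : 0 ≤ r ∧ r < tr ∧ 0 ≤ c ∧ c < tc) :
    ∃ (hi : r.toNat < g.length) (hj : c.toNat < g[r.toNat].length),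
      pvGet g r c = g[r.toNat][c.toNat] := by
  obtain ⟨h1, h2⟩ := hok
  have hi : r.toNat < g.length := by omega
  have hj : c.toNat < g[r.toNat].length := by
    have hit : r.toNat < (g.take tr.toNat).length := by
      simp only [List.length_take]
      omega
    have hmem : g[r.toNat] ∈ g.take tr.toNat := by
      have : (g.take tr.toNat)[r.toNat] = g[r.toNat] := List.getElem_take
      rw [← this]
      exact List.getElem_mem hit
    have := h2 g[r.toNat] hmem
    omega
  refine ⟨hi, hj, ?_⟩
  unfold pvGet
  rw [PySem.List.pyGet?_of_nonneg _ hb.1]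
  rw [List.getElem?_eq_getElem hi]
  simp only [Option.bind_some]
  rw [PySem.List.pyGet?_of_nonneg _ hb.2.2.1, List.getElem?_eq_getElem hj]
  rfl

-- a guarded set really decreases the measure
theorem pvUC_set_lt {g : List (List Int)} {tr tc r c : Int} (hok : pvOK g tr tc)
    (hb : 0 ≤ r ∧ r < tr ∧ 0 ≤ c ∧ c < tc) (hv : pvGet g r c ≠ 2) :
    pvUC (pvSet g r c 2) < pvUC g := by
  obtain ⟨hi, hj, hget⟩ := pvGet_eq hok hb
  rw [hget] at hv
  unfold pvSet pvUC
  rw [if_pos ⟨hb.1, hb.2.2.1⟩, List.getD_eq_getElem _ _ hi, List.map_set]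
  set p : Int → Bool := fun x => decide (x ≠ 2) with hp
  have hcnt : (g[r.toNat].set c.toNat 2).countP p = g[r.toNat].countP p - 1 := by
    rw [List.countP_set hj]
    simp [hp, hv]
  have hpos : 0 < g[r.toNat].countP p := by
    rw [List.countP_pos_iff]
    exact ⟨g[r.toNat][c.toNat], List.getElem_mem hj, by simp [hp, hv]⟩
  have hlt : (g[r.toNat].set c.toNat 2).countP p < g[r.toNat].countP p := by omega
  have hmi : r.toNat < (g.map (fun rw => rw.countP p)).length := by simpa using hi
  have := pvSum_set (g.map (fun rw => rw.countP p)) r.toNat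
    ((g[r.toNat].set c.toNat 2).countP p) hmi
  simp only [List.getElem_map] at this
  omega

theorem pvShape_mark (f : Nat) (g : List (List Int)) (r c tr tc : Int) :
    pvShape (pvMark f g r c tr tc) = pvShape g := by
  induction f generalizing g r c with
  | zero => rfl
  | succ f ih =>
    simp only [pvMark]
    split_ifs with h1 h2
    · rfl
    · rw [ih, ih, ih, ih, pvShape_set]
    · rfl

theorem pvUC_mark_le (f : Nat) (g : List (List Int)) (r c tr tc : Int) :
    pvUC (pvMark f g r c tr tc) ≤ pvUC g := by
  induction f generalizing g r c with
  | zero => exact Nat.le_refl _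
  | succ f ih =>
    simp only [pvMark]
    split_ifs with h1 h2
    · exact Nat.le_refl _
    · calc pvUC (pvMark f (pvMark f (pvMark f (pvMark f (pvSet g r c 2) (r - 1) c tr tc)
            (r + 1) c tr tc) r (c - 1) tr tc) r (c + 1) tr tc)
          ≤ pvUC (pvSet g r c 2) := le_trans (ih ..) (le_trans (ih ..) (le_trans (ih ..) (ih ..)))
        _ ≤ pvUC g := by
            unfold pvSet pvUC
            split
            · by_cases hi : r.toNat < g.length
              · rw [List.getD_eq_getElem _ _ hi, List.map_set]
                have hmi : r.toNat < (g.map (fun rw => rw.countP (fun x => decide (x ≠ 2)))).length := by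
                  simpa using hi
                have := pvSum_set (g.map (fun rw => rw.countP (fun x => decide (x ≠ 2)))) r.toNat
                  ((g[r.toNat].set c.toNat 2).countP (fun x => decide (x ≠ 2))) hmi
                simp only [List.getElem_map] at this
                have hle : (g[r.toNat].set c.toNat 2).countP (fun x => decide (x ≠ 2))
                    ≤ g[r.toNat].countP (fun x => decide (x ≠ 2)) := by
                  by_cases hj : c.toNat < g[r.toNat].length
                  · rw [List.countP_set hj]
                    simp only [decide_not]
                    split_ifs <;> simp_all
                  · rw [List.set_eq_of_length_le (by omega)]
                omega
              · rw [List.set_eq_of_length_le (by omega)]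
            · exact Nat.le_refl _
    · exact Nat.le_refl _

-- fuel irrelevance: any fuel above the measure gives the same result
theorem pvMark_fuel {tr tc : Int} : ∀ (n : Nat) (g : List (List Int)) (r c : Int) (f1 f2 : Nat),
    pvUC g ≤ n → pvOK g tr tc → pvUC g < f1 → pvUC g < f2 →
    pvMark f1 g r c tr tc = pvMark f2 g r c tr tc := by
  intro n
  induction n with
  | zero =>
    intro g r c f1 f2 hn hok h1 h2
    match f1, f2 with
    | a + 1, b + 1 =>
      simp only [pvMark]
      split_ifs with hb hv
      · rfl
      · rw [not_or] at hv
        have := pvUC_set_lt hok hb hv.1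
        omega
      · rfl
  | succ n ih =>
    intro g r c f1 f2 hn hok h1 h2
    match f1, f2 with
    | a + 1, b + 1 =>
      simp only [pvMark]
      split_ifs with hb hv
      · rfl
      · rw [not_or] at hv
        have hd : pvUC (pvSet g r c 2) < pvUC g := pvUC_set_lt hok hb hv.1
        have hok1 : pvOK (pvSet g r c 2) tr tc := pvOK_of_shape (pvShape_set ..) hok
        have e1 : pvMark a (pvSet g r c 2) (r - 1) c tr tc
            = pvMark b (pvSet g r c 2) (r - 1) c tr tc :=
          ih _ _ _ _ _ (by omega) hok1 (by omega) (by omega)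
        rw [e1]
        have hm1 := pvUC_mark_le b (pvSet g r c 2) (r - 1) c tr tc
        have hok2 : pvOK (pvMark b (pvSet g r c 2) (r - 1) c tr tc) tr tc :=
          pvOK_of_shape (by rw [pvShape_mark, pvShape_set]) hok
        have e2 : pvMark a (pvMark b (pvSet g r c 2) (r - 1) c tr tc) (r + 1) c tr tc
            = pvMark b (pvMark b (pvSet g r c 2) (r - 1) c tr tc) (r + 1) c tr tc :=
          ih _ _ _ _ _ (by omega) hok2 (by omega) (by omega)
        rw [e2]
        have hm2 := pvUC_mark_le b (pvMark b (pvSet g r c 2) (r - 1) c tr tc) (r + 1) c tr tc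
        have hok3 : pvOK (pvMark b (pvMark b (pvSet g r c 2) (r - 1) c tr tc) (r + 1) c tr tc) tr tc :=
          pvOK_of_shape (by rw [pvShape_mark, pvShape_mark, pvShape_set]) hok
        have e3 : pvMark a (pvMark b (pvMark b (pvSet g r c 2) (r - 1) c tr tc) (r + 1) c tr tc) r (c - 1) tr tc
            = pvMark b (pvMark b (pvMark b (pvSet g r c 2) (r - 1) c tr tc) (r + 1) c tr tc) r (c - 1) tr tc :=
          ih _ _ _ _ _ (by omega) hok3 (by omega) (by omega)
        rw [e3]
        have hm3 := pvUC_mark_le b (pvMark b (pvMark b (pvSet g r c 2) (r - 1) c tr tc) (r + 1) c tr tc) r (c - 1) tr tc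
        have hok4 : pvOK (pvMark b (pvMark b (pvMark b (pvSet g r c 2) (r - 1) c tr tc) (r + 1) c tr tc) r (c - 1) tr tc) tr tc :=
          pvOK_of_shape (by rw [pvShape_mark, pvShape_mark, pvShape_mark, pvShape_set]) hok
        exact ih _ _ _ _ _ (by omega) hok4 (by omega) (by omega)
      · rfl

-- the canonical (fuel-free) flood fill
def pvMarkC (g : List (List Int)) (r c tr tc : Int) : List (List Int) :=
  pvMark (pvUC g + 1) g r c tr tc

theorem pvMarkC_eq {g : List (List Int)} {tr tc : Int} (f : Nat) (r c : Int)
    (hok : pvOK g tr tc) (hf : pvUC g < f) :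
    pvMark f g r c tr tc = pvMarkC g r c tr tc :=
  pvMark_fuel (pvUC g) g r c f (pvUC g + 1) (Nat.le_refl _) hok hf (Nat.lt_succ_self _)

theorem pvShape_markC (g : List (List Int)) (r c tr tc : Int) :
    pvShape (pvMarkC g r c tr tc) = pvShape g := pvShape_mark _ g r c tr tc

theorem pvUC_markC_le (g : List (List Int)) (r c tr tc : Int) :
    pvUC (pvMarkC g r c tr tc) ≤ pvUC g := pvUC_mark_le _ g r c tr tc

-- unfolding equation of pvMarkC in canonical form
theorem pvMarkC_unfold {g : List (List Int)} {tr tc : Int} (r c : Int) (hok : pvOK g tr tc) :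
    pvMarkC g r c tr tc =
      if 0 ≤ r ∧ r < tr ∧ 0 ≤ c ∧ c < tc then
        if pvGet g r c = 2 ∨ pvGet g r c = 0 then g
        else
          pvMarkC (pvMarkC (pvMarkC (pvMarkC (pvSet g r c 2) (r - 1) c tr tc)
            (r + 1) c tr tc) r (c - 1) tr tc) r (c + 1) tr tc
      else g := by
  conv_lhs => unfold pvMarkC
  simp only [pvMark]
  split_ifs with hb hv
  · rfl
  · rw [not_or] at hv
    have hd : pvUC (pvSet g r c 2) < pvUC g := pvUC_set_lt hok hb hv.1
    have hok1 : pvOK (pvSet g r c 2) tr tc := pvOK_of_shape (pvShape_set ..) hok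
    rw [show pvMark (pvUC g) (pvSet g r c 2) (r - 1) c tr tc
        = pvMarkC (pvSet g r c 2) (r - 1) c tr tc from pvMarkC_eq _ _ _ hok1 (by omega)]
    have hm1 := pvUC_markC_le (pvSet g r c 2) (r - 1) c tr tc
    have hok2 : pvOK (pvMarkC (pvSet g r c 2) (r - 1) c tr tc) tr tc :=
      pvOK_of_shape (by rw [pvShape_markC, pvShape_set]) hok
    rw [show pvMark (pvUC g) (pvMarkC (pvSet g r c 2) (r - 1) c tr tc) (r + 1) c tr tc
        = pvMarkC (pvMarkC (pvSet g r c 2) (r - 1) c tr tc) (r + 1) c tr tc from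
      pvMarkC_eq _ _ _ hok2 (by omega)]
    have hm2 := pvUC_markC_le (pvMarkC (pvSet g r c 2) (r - 1) c tr tc) (r + 1) c tr tc
    have hok3 : pvOK (pvMarkC (pvMarkC (pvSet g r c 2) (r - 1) c tr tc) (r + 1) c tr tc) tr tc :=
      pvOK_of_shape (by rw [pvShape_markC, pvShape_markC, pvShape_set]) hok
    rw [show pvMark (pvUC g) (pvMarkC (pvMarkC (pvSet g r c 2) (r - 1) c tr tc) (r + 1) c tr tc) r (c - 1) tr tc
        = pvMarkC (pvMarkC (pvMarkC (pvSet g r c 2) (r - 1) c tr tc) (r + 1) c tr tc) r (c - 1) tr tc from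
      pvMarkC_eq _ _ _ hok3 (by omega)]
    have hm3 := pvUC_markC_le (pvMarkC (pvMarkC (pvSet g r c 2) (r - 1) c tr tc) (r + 1) c tr tc) r (c - 1) tr tc
    have hok4 : pvOK (pvMarkC (pvMarkC (pvMarkC (pvSet g r c 2) (r - 1) c tr tc) (r + 1) c tr tc) r (c - 1) tr tc) tr tc :=
      pvOK_of_shape (by rw [pvShape_markC, pvShape_markC, pvShape_markC, pvShape_set]) hok
    rw [show pvMark (pvUC g) (pvMarkC (pvMarkC (pvMarkC (pvSet g r c 2) (r - 1) c tr tc) (r + 1) c tr tc) r (c - 1) tr tc) r (c + 1) tr tc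
        = pvMarkC (pvMarkC (pvMarkC (pvMarkC (pvSet g r c 2) (r - 1) c tr tc) (r + 1) c tr tc) r (c - 1) tr tc) r (c + 1) tr tc from
      pvMarkC_eq _ _ _ hok4 (by omega)]
  · rfl

-- a blocked cell leaves the flood fill unchanged
theorem pvMarkC_skip {g : List (List Int)} {tr tc r c : Int} (hok : pvOK g tr tc)
    (hg : ¬(0 ≤ r ∧ r < tr ∧ 0 ≤ c ∧ c < tc ∧ pvGet g r c ≠ 0 ∧ pvGet g r c ≠ 2)) :
    pvMarkC g r c tr tc = g := by
  rw [pvMarkC_unfold r c hok]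
  split_ifs with hb hv
  · rfl
  · tauto
  · rfl

-- an open cell unfolds into the four recursive flood fills
theorem pvMarkC_step {g : List (List Int)} {tr tc r c : Int} (hok : pvOK g tr tc)
    (hg : 0 ≤ r ∧ r < tr ∧ 0 ≤ c ∧ c < tc ∧ pvGet g r c ≠ 0 ∧ pvGet g r c ≠ 2) :
    pvMarkC g r c tr tc =
      pvMarkC (pvMarkC (pvMarkC (pvMarkC (pvSet g r c 2) (r - 1) c tr tc)
        (r + 1) c tr tc) r (c - 1) tr tc) r (c + 1) tr tc := by
  rw [pvMarkC_unfold r c hok]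
  rw [if_pos ⟨hg.1, hg.2.1, hg.2.2.1, hg.2.2.2.1⟩, if_neg (by tauto)]

-- the stack loop performs exactly the sequence of recursive flood fills of its stack
theorem pvStack_eq {tr tc : Int} : ∀ (f : Nat) (g : List (List Int)) (st : List (Int × Int)),
    pvOK g tr tc → st.length + 5 * pvUC g < f →
    pvStack f g st tr tc = st.foldl (fun h v => pvMarkC h v.1 v.2 tr tc) g := by
  intro f
  induction f with
  | zero => intro g st hok h; omega
  | succ f ih =>
    intro g st hok h
    match st with
    | [] => rfl
    | (r, c) :: st =>
      simp only [pvStack]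
      split_ifs with hg
      · have hb : 0 ≤ r ∧ r < tr ∧ 0 ≤ c ∧ c < tc := ⟨hg.1, hg.2.1, hg.2.2.1, hg.2.2.2.1⟩
        have hd : pvUC (pvSet g r c 2) < pvUC g := pvUC_set_lt hok hb hg.2.2.2.2.2
        have hok1 : pvOK (pvSet g r c 2) tr tc := pvOK_of_shape (pvShape_set ..) hok
        rw [ih _ _ hok1 (by simp only [List.length_cons] at h ⊢; omega)]
        simp only [List.foldl_cons]
        congr 1
        rw [pvMarkC_step hok hg]
      · rw [ih _ _ hok (by simp only [List.length_cons] at h; omega)]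
        simp only [List.foldl_cons]
        congr 1
        rw [pvMarkC_skip hok hg]

-- in-bounds indices are genuine indices
theorem pvGet_idx {g : List (List Int)} {tr tc r c : Int} (hok : pvOK g tr tc)
    (hb : 0 ≤ r ∧ r < tr ∧ 0 ≤ c ∧ c < tc) :
    r.toNat < g.length ∧ c.toNat < (g.getD r.toNat []).length := by
  obtain ⟨h1, h2⟩ := hok
  have hi : r.toNat < g.length := by omega
  refine ⟨hi, ?_⟩
  rw [List.getD_eq_getElem _ _ hi]
  have hmem : g[r.toNat] ∈ g.take tr.toNat := by
    have : (g.take tr.toNat)[r.toNat]'(by simp only [List.length_take]; omega) = g[r.toNat] := List.getElem_take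
    rw [← this]
    exact List.getElem_mem _
  have := h2 g[r.toNat] hmem
  omega

-- pvGet at nonnegative indices, in getElem? form
theorem pvGet_get? (g : List (List Int)) (r c : Int) (hr : 0 ≤ r) (hc : 0 ≤ c) :
    pvGet g r c = ((g[r.toNat]?).bind (fun rw => rw[c.toNat]?)).getD 0 := by
  unfold pvGet
  rw [PySem.List.pyGet?_of_nonneg _ hr]
  cases hg : g[r.toNat]? with
  | none => rfl
  | some rw => simp [PySem.List.pyGet?_of_nonneg _ hc]

-- writing one in-bounds cell, read back at any in-bounds cell
theorem pvGet_set {g : List (List Int)} {tr tc r c r' c' : Int} (hok : pvOK g tr tc)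
    (hb : 0 ≤ r ∧ r < tr ∧ 0 ≤ c ∧ c < tc) (hb' : 0 ≤ r' ∧ r' < tr ∧ 0 ≤ c' ∧ c' < tc) :
    pvGet (pvSet g r c 2) r' c' = if r' = r ∧ c' = c then 2 else pvGet g r' c' := by
  obtain ⟨hi, hj⟩ := pvGet_idx hok hb
  obtain ⟨hi2, hj2⟩ := pvGet_idx hok hb'
  rw [pvGet_get? _ _ _ hb'.1 hb'.2.2.1, pvGet_get? g _ _ hb'.1 hb'.2.2.1]
  simp only [pvSet, if_pos (And.intro hb.1 hb.2.2.1), List.getD_eq_getElem _ _ hi] at hj ⊢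
  rw [List.getElem?_eq_getElem hi2]
  simp only [Option.bind_some]
  by_cases hr : r' = r
  · subst hr
    rw [List.getElem?_set_self (by omega)]
    simp only [Option.bind_some]
    rw [List.getElem?_set]
    by_cases hc : c' = c
    · subst hc
      rw [if_pos rfl, if_pos hj, if_pos (by simp)]
      rfl
    · rw [if_neg (by omega), if_neg (by tauto)]
  · rw [List.getElem?_set_ne (by omega), List.getElem?_eq_getElem hi2]
    simp only [Option.bind_some]
    rw [if_neg (by tauto)]

-- adding one cell to the visited set, read back through val
theorem pvVal_add (arr : List (List Int)) (M : PySem.Set (Int × Int)) (p : Int × Int) (r' c' : Int) :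
    pvVal arr (PySem.Set.add M p) r' c' = if (r', c') = p then 2 else pvVal arr M r' c' := by
  unfold pvVal
  by_cases hp : (r', c') = p
  · rw [if_pos hp, if_pos ((PySem.Set.mem_add M p (r', c')).mpr (Or.inr hp))]
  · rw [if_neg hp]
    by_cases hm : (r', c') ∈ M
    · rw [if_pos ((PySem.Set.mem_add M p (r', c')).mpr (Or.inl hm)), if_pos hm]
    · rw [if_neg (fun h => by rcases (PySem.Set.mem_add M p (r', c')).mp h with h | h <;> tauto), if_neg hm]

-- LOCKSTEP: the grid-mutating stack loop and the visited-set stack loop agree cell by cell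
theorem pvLockstep {arr : List (List Int)} {tr tc : Int} (hok0 : pvOK arr tr tc) :
    ∀ (f : Nat) (g : List (List Int)) (M : PySem.Set (Int × Int)) (st : List (Int × Int)),
    pvShape g = pvShape arr →
    (∀ r c, 0 ≤ r ∧ r < tr ∧ 0 ≤ c ∧ c < tc → pvGet g r c = pvVal arr M r c) →
    pvShape (pvStack f g st tr tc) = pvShape arr ∧
    (∀ r c, 0 ≤ r ∧ r < tr ∧ 0 ≤ c ∧ c < tc →
      pvGet (pvStack f g st tr tc) r c = pvVal arr (pvBfs f arr M st tr tc) r c) := by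
  intro f
  induction f with
  | zero =>
    intro g M st hsh hinv
    match st with
    | [] => exact ⟨hsh, hinv⟩
    | _ :: _ => exact ⟨hsh, hinv⟩
  | succ f ih =>
    intro g M st hsh hinv
    match st with
    | [] => exact ⟨hsh, hinv⟩
    | (r, c) :: st =>
      simp only [pvStack, pvBfs]
      by_cases hb : 0 ≤ r ∧ r < tr ∧ 0 ≤ c ∧ c < tc
      · have hval : pvGet g r c = pvVal arr M r c := hinv r c hb
        by_cases hv : pvGet g r c ≠ 0 ∧ pvGet g r c ≠ 2
        · rw [if_pos ⟨hb.1, hb.2.1, hb.2.2.1, hb.2.2.2, hv⟩,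
            if_pos ⟨hb.1, hb.2.1, hb.2.2.1, hb.2.2.2, by rw [← hval]; exact hv.1, by rw [← hval]; exact hv.2⟩]
          apply ih
          · rw [pvShape_set, hsh]
          · intro r' c' hb'
            rw [pvGet_set (pvOK_of_shape hsh hok0) hb hb', pvVal_add]
            by_cases he : r' = r ∧ c' = c
            · rw [if_pos he, if_pos (by simp [he.1, he.2])]
            · rw [if_neg he, if_neg (by simp [Prod.ext_iff]; tauto)]
              exact hinv r' c' hb'
        · rw [if_neg (by tauto), if_neg (by rw [← hval]; tauto)]
          exact ih g M st hsh hinv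
      · rw [if_neg (by tauto), if_neg (by tauto)]
        exact ih g M st hsh hinv

-- 'if p(x): out.append(f(x))' over a Prop test, in filter form
theorem pvFoldFilter {α β : Type} (q : α → Prop) [DecidablePred q] (f : α → β) :
    ∀ (l : List α) (res : List β),
    l.foldl (fun res x => if q x then res ++ [f x] else res) res
      = res ++ (l.filter (fun x => decide (q x))).map f := by
  intro l
  induction l with
  | nil => simp
  | cons x t ih =>
    intro res
    by_cases hx : q x <;> simp [hx, ih]

-- A's nested-loop collector in flatMap/filter form
theorem pvCollect_eq (G : List (List Int)) (row col : Int) :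
    (PySem.List.pyRange 0 row 1).foldl (fun res i =>
      (PySem.List.pyRange 0 col 1).foldl (fun res j =>
        if pvGet G i j = 1 then res ++ [(i, j)] else res) res) []
    = (PySem.List.pyRange 0 row 1).flatMap (fun i =>
        ((PySem.List.pyRange 0 col 1).filter (fun j => pvGet G i j == 1)).map (fun j => (i, j))) := by
  have hinner : ∀ (i : Int) (res : List (Int × Int)),
      (PySem.List.pyRange 0 col 1).foldl (fun res j =>
        if pvGet G i j = 1 then res ++ [(i, j)] else res) res
      = res ++ ((PySem.List.pyRange 0 col 1).filter (fun j => pvGet G i j == 1)).map (fun j => (i, j)) := by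
    intro i res
    rw [pvFoldFilter (fun j => pvGet G i j = 1) (fun j => ((i, j) : Int × Int))]
    have hfun : (fun j => decide (pvGet G i j = 1)) = (fun j => pvGet G i j == 1) := by
      funext j
      exact (Bool.beq_eq_decide_eq (pvGet G i j) 1).symm
    rw [hfun]
  simp only [hinner]
  rw [PySem.List.foldl_append_eq_flatMap]
  rfl

-- the two result collectors agree whenever grid-after-marking and visited set correspond
theorem pvResult_eq (arr G : List (List Int)) (M : PySem.Set (Int × Int)) (row col : Int)
    (hinv : ∀ i j, 0 ≤ i ∧ i < row ∧ 0 ≤ j ∧ j < col → pvGet G i j = pvVal arr M i j) :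
    (PySem.List.pyRange 0 row 1).flatMap (fun i =>
      ((PySem.List.pyRange 0 col 1).filter (fun j => pvGet G i j == 1)).map (fun j => (i, j)))
    = (PySem.List.pyRange 0 row 1).flatMap (fun i =>
      ((PySem.List.pyRange 0 col 1).filter
        (fun j => pvGet arr i j == 1 && !(decide ((i, j) ∈ M)))).map (fun j => (i, j))) := by
  have hrow : ∀ i ∈ PySem.List.pyRange 0 row 1, 0 ≤ i ∧ i < row := by
    intro i hi
    have := PySem.List.mem_pyRange_one.mp hi
    omega
  revert hrow
  generalize PySem.List.pyRange 0 row 1 = l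
  intro hrow
  induction l with
  | nil => rfl
  | cons x t ih =>
    have hx := hrow x (List.mem_cons_self ..)
    simp only [List.flatMap_cons]
    rw [ih (fun i hi => hrow i (List.mem_cons_of_mem _ hi))]
    congr 1
    congr 1
    apply List.filter_congr
    intro j hj
    have hjb := PySem.List.mem_pyRange_one.mp hj
    rw [hinv x j (by omega)]
    by_cases hm : (x, j) ∈ M
    · simp [pvVal, hm]
    · simp [pvVal, hm]

-- ===== VERDICT (by name: the statement is the Claim_ definition above) =====
theorem get_non_connected_bricks_spec : Claim_equal_get_non_connected_bricks := by
  intro arr row col hdom hpre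
  unfold Spec_get_non_connected_bricks
  rcases hpre with hc | ⟨hr, hc, hlen, hw⟩
  · -- col ≤ 0: both loops are empty and both programs return []
    simp [get_non_connected_bricks, get_non_connected_bricks_alt,
      PySem.List.pyRange_one_eq_nil (show col ≤ (0 : Int) from hc), List.foldl_fixed]
  · have hok0 : pvOK arr row col := ⟨by omega, hw⟩
    have htot : ∀ g : List (List Int), pvShape g = pvShape arr →
        pvUC g ≤ (arr.map List.length).sum := by
      intro g hsh
      have h1 := pvUC_le g
      have h2 : (g.map List.length).sum = (arr.map List.length).sum := congrArg List.sum hsh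
      omega
    have seeds : ∀ (l : List Int), (∀ i ∈ l, 0 ≤ i ∧ i < col) →
        ∀ g M, pvShape g = pvShape arr →
        (∀ r c, 0 ≤ r ∧ r < row ∧ 0 ≤ c ∧ c < col → pvGet g r c = pvVal arr M r c) →
        pvShape (l.foldl (fun g i => if pvGet g (row - 1) i = 1 then
            pvMark (pvFuelA arr) (pvSet g (row - 1) i 2) (row - 2) i row col else g) g)
          = pvShape arr ∧
        (∀ r c, 0 ≤ r ∧ r < row ∧ 0 ≤ c ∧ c < col →
          pvGet (l.foldl (fun g i => if pvGet g (row - 1) i = 1 then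
              pvMark (pvFuelA arr) (pvSet g (row - 1) i 2) (row - 2) i row col else g) g) r c
          = pvVal arr (l.foldl (fun M i => if pvVal arr M (row - 1) i = 1 then
              pvBfs (pvFuelB arr) arr (PySem.Set.add M (row - 1, i)) [(row - 2, i)] row col else M) M) r c) := by
      intro l
      induction l with
      | nil => intro _ g M hsh hinv; exact ⟨hsh, hinv⟩
      | cons i t ih =>
        intro hmem g M hsh hinv
        have hi := hmem i (List.mem_cons_self ..)
        have hok : pvOK g row col := pvOK_of_shape hsh hok0
        have hbseed : 0 ≤ row - 1 ∧ row - 1 < row ∧ 0 ≤ i ∧ i < col := by omega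
        have hseedval : pvGet g (row - 1) i = pvVal arr M (row - 1) i := hinv _ _ hbseed
        simp only [List.foldl_cons]
        by_cases hgi : pvGet g (row - 1) i = 1
        · rw [if_pos hgi, if_pos (by rw [← hseedval]; exact hgi)]
          have hsh1 : pvShape (pvSet g (row - 1) i 2) = pvShape arr := by
            rw [pvShape_set, hsh]
          have hok1 : pvOK (pvSet g (row - 1) i 2) row col := pvOK_of_shape hsh1 hok0
          have hu1 : pvUC (pvSet g (row - 1) i 2) ≤ (arr.map List.length).sum := htot _ hsh1
          have hA : pvMark (pvFuelA arr) (pvSet g (row - 1) i 2) (row - 2) i row col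
              = pvStack (pvFuelB arr) (pvSet g (row - 1) i 2) [(row - 2, i)] row col := by
            rw [pvMarkC_eq (pvFuelA arr) (row - 2) i hok1 (by unfold pvFuelA; omega)]
            rw [pvStack_eq (pvFuelB arr) _ [(row - 2, i)] hok1
              (by unfold pvFuelB; simp only [List.length_cons, List.length_nil]; omega)]
            simp only [List.foldl_cons, List.foldl_nil]
          rw [hA]
          have hinv1 : ∀ r c, 0 ≤ r ∧ r < row ∧ 0 ≤ c ∧ c < col →
              pvGet (pvSet g (row - 1) i 2) r c
                = pvVal arr (PySem.Set.add M (row - 1, i)) r c := by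
            intro r c hb'
            rw [pvGet_set hok hbseed hb', pvVal_add]
            by_cases he : r = row - 1 ∧ c = i
            · rw [if_pos he, if_pos (by simp [he.1, he.2])]
            · rw [if_neg he, if_neg (by simp [Prod.ext_iff]; tauto)]
              exact hinv r c hb'
          obtain ⟨hsh2, hinv2⟩ := pvLockstep hok0 (pvFuelB arr) (pvSet g (row - 1) i 2)
            (PySem.Set.add M (row - 1, i)) [(row - 2, i)] hsh1 hinv1
          exact ih (fun j hj => hmem j (List.mem_cons_of_mem _ hj)) _ _ hsh2 hinv2
        · rw [if_neg hgi, if_neg (by rw [← hseedval]; exact hgi)]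
          exact ih (fun j hj => hmem j (List.mem_cons_of_mem _ hj)) _ _ hsh hinv
    obtain ⟨-, hinvF⟩ := seeds (PySem.List.pyRange 0 col 1)
      (fun i hi => by
        have := PySem.List.mem_pyRange_one.mp hi
        omega) arr PySem.Set.empty rfl
      (fun r c _ => by simp [pvVal, PySem.Set.empty])
    simp only [get_non_connected_bricks, get_non_connected_bricks_alt]
    rw [pvCollect_eq]
    exact pvResult_eq arr _ _ row col hinvF
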